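-- pv_equiv track=rewrite | github.com/Unodetantosluises/spotify-latest-episodes | main.py | build_ruta_diaria
-- ===== SOURCE A (Python) =====
-- def build_ruta_diaria(episode_uris, track_uris, tracks_per_episode=5):
--     """Intercala episodios y canciones en un solo arreglo."""
--     ruta_diaria = []
--     track_index = 0
--     total_tracks = len(track_uris)
--
--     for episode in episode_uris:
--         # 1. Agregamos el episodio de noticias
--         ruta_diaria.append(episode)
--
--         # 2. Agregamos las 5 canciones siguientes
--         for _ in range(tracks_per_episode):
--             if track_index < total_tracks:
--                 ruta_diaria.append(track_uris[track_index])
--                 track_index += 1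
--             else:
--                 break  # Se nos acabaron las canciones disponibles
--
--     return ruta_diaria
-- ===== SOURCE B (Python) =====
-- def build_ruta_diaria(episode_uris, track_uris, tracks_per_episode=5):
--     """Intercala episodios y canciones en un solo arreglo."""
--     n = max(tracks_per_episode, 0)
--     return [uri
--             for i, episode in enumerate(episode_uris)
--             for uri in [episode, *track_uris[i * n:(i + 1) * n]]]
-- ===== Notes on version B (the rewrite author's own statement) =====
-- stated objective: idiomatic
-- what changed: Replaced the running track_index counter and the guarded inner range-loop with a break by a single enumerate comprehension that takes each episode's tracks as an arithmetic slice track_uris[i*n:(i+1)*n] (n clamped to 0).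
import Mathlib
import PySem

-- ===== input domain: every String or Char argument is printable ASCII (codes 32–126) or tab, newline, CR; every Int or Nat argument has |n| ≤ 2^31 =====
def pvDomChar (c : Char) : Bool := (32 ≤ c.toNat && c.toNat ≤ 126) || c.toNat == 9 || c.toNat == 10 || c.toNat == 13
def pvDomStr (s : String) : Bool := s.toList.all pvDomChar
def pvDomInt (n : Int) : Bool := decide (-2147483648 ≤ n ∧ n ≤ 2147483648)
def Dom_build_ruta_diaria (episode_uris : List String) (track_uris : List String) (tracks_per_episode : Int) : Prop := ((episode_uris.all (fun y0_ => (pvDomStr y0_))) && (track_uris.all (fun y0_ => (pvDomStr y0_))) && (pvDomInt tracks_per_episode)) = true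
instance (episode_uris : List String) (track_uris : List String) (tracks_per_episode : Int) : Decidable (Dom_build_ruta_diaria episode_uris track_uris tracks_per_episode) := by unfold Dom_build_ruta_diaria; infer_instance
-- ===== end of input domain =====

-- B replaces A's running track counter and guard/break inner loop with an
-- enumerate + arithmetic slice per episode (objective: idiomatic; same cost).

-- ===== PORT A =====
-- inner 'for _ in range(tracks_per_episode)' loop with its break; the fuel is
-- the number of range iterations (tracks_per_episode.toNat, as in Python).
-- track_uris[track_index] is guarded by track_index < total, so the .getD ""
-- default is never taken (pyGet? is some there).
def pvInnerA (tracks : List String) (total : Int) : Nat → List String → Int → List String × Int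
  | 0, ruta, ti => (ruta, ti)
  | k+1, ruta, ti =>
    if ti < total then
      pvInnerA tracks total k (ruta ++ [(PySem.List.pyGet? tracks ti).getD ""]) (ti + 1)
    else (ruta, ti)

def build_ruta_diaria (episode_uris : List String) (track_uris : List String) (tracks_per_episode : Int) : List String :=
  let total : Int := track_uris.length
  (episode_uris.foldl
      (fun (st : List String × Int) episode =>
        pvInnerA track_uris total tracks_per_episode.toNat (st.1 ++ [episode]) st.2)
      ([], 0)).1

-- ===== PORT B =====
-- enumerate(episode_uris)
def pvEnum {α : Type} : Nat → List α → List (Nat × α)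
  | _, [] => []
  | i, x :: xs => (i, x) :: pvEnum (i + 1) xs

def build_ruta_diaria_alt (episode_uris : List String) (track_uris : List String) (tracks_per_episode : Int) : List String :=
  let n : Int := max tracks_per_episode 0
  (pvEnum 0 episode_uris).flatMap
    (fun p => p.2 :: PySem.List.slice track_uris (some ((p.1 : Int) * n)) (some (((p.1 : Int) + 1) * n)))

-- ===== PRECONDITION & SPEC =====
def Spec_build_ruta_diaria (episode_uris : List String) (track_uris : List String) (tracks_per_episode : Int) (out : List String) : Prop := out = build_ruta_diaria_alt episode_uris track_uris tracks_per_episode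
instance (episode_uris : List String) (track_uris : List String) (tracks_per_episode : Int) (out : List String) : Decidable (Spec_build_ruta_diaria episode_uris track_uris tracks_per_episode out) := by unfold Spec_build_ruta_diaria; infer_instance

-- ===== CLAIM (what is proved, stated in full; the proofs are below) =====
def Claim_equal_build_ruta_diaria : Prop := ∀ (episode_uris : List String) (track_uris : List String) (tracks_per_episode : Int), Dom_build_ruta_diaria episode_uris track_uris tracks_per_episode → Spec_build_ruta_diaria episode_uris track_uris tracks_per_episode (build_ruta_diaria episode_uris track_uris tracks_per_episode)

-- ===== LEMMAS AND PROOFS =====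

-- A's inner loop, started at index j ≤ len, appends tracks[j : j+k] and leaves
-- the counter at min (j+k) len.
theorem pvInnerA_eq (tracks : List String) (k : Nat) :
    ∀ (ruta : List String) (j : Nat), j ≤ tracks.length →
      pvInnerA tracks (tracks.length : Int) k ruta (j : Int)
        = (ruta ++ (tracks.drop j).take k, ((min (j + k) tracks.length : Nat) : Int)) := by
  induction k with
  | zero =>
    intro ruta j hj
    simp [pvInnerA, Nat.min_eq_left hj]
  | succ k ih =>
    intro ruta j hj
    by_cases h : j < tracks.length
    · have hstep : pvInnerA tracks (tracks.length : Int) (k+1) ruta (j : Int)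
          = pvInnerA tracks (tracks.length : Int) k (ruta ++ [tracks[j]]) ((j : Int) + 1) := by
        -- the guarded tracks[track_index]: in range, so getD "" returns the element
        simp [pvInnerA, h]
      rw [hstep]
      have : ((j : Int) + 1) = ((j + 1 : Nat) : Int) := by push_cast; ring
      rw [this, ih (ruta ++ [tracks[j]]) (j + 1) h, Prod.mk.injEq]
      refine ⟨?_, by congr 1; omega⟩
      rw [List.append_assoc]
      congr 1
      rw [List.drop_eq_getElem_cons h, List.take_succ_cons]
      rfl
    · have hj' : j = tracks.length := by omega
      subst hj'
      simp [pvInnerA]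

-- the outer fold, started after i episodes (counter = min (i*N) len), produces
-- acc ++ B's flatMap over the remaining episodes enumerated from i.
theorem pvOuter_eq (tracks : List String) (N : Nat) (eps : List String) :
    ∀ (i : Nat) (acc : List String),
      (eps.foldl
          (fun (st : List String × Int) episode =>
            pvInnerA tracks (tracks.length : Int) N (st.1 ++ [episode]) st.2)
          (acc, ((min (i * N) tracks.length : Nat) : Int))).1
        = acc ++ (pvEnum i eps).flatMap
            (fun p => p.2 :: PySem.List.slice tracks (some ((p.1 : Int) * (N : Int))) (some (((p.1 : Int) + 1) * (N : Int)))) := by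
  induction eps with
  | nil => intro i acc; simp [pvEnum]
  | cons ep rest ih =>
    intro i acc
    have hj : min (i * N) tracks.length ≤ tracks.length := Nat.min_le_right _ _
    rw [List.foldl_cons]
    have hinner := pvInnerA_eq tracks N (acc ++ [ep]) (min (i * N) tracks.length) hj
    simp only [hinner]
    have htrack : (tracks.drop (min (i * N) tracks.length)).take N = (tracks.drop (i * N)).take N := by
      by_cases h : i * N ≤ tracks.length
      · rw [Nat.min_eq_left h]
      · rw [Nat.min_eq_right (by omega), List.drop_length,
            List.drop_eq_nil_of_le (by omega)]
    have hcount : min (min (i * N) tracks.length + N) tracks.length = min ((i + 1) * N) tracks.length := by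
      rcases Nat.le_total (i * N) tracks.length with h | h
      · rw [Nat.min_eq_left h]; congr 1; ring
      · have h1 : min (i * N) tracks.length = tracks.length := Nat.min_eq_right h
        rw [h1]
        have : min ((i + 1) * N) tracks.length = tracks.length :=
          Nat.min_eq_right (le_trans h (by nlinarith))
        omega
    rw [htrack, hcount, ih (i + 1)]
    have hslice : PySem.List.slice tracks (some ((i : Int) * (N : Int))) (some (((i : Int) + 1) * (N : Int)))
        = (tracks.drop (i * N)).take N := by
      have h1 : ((i : Int) * (N : Int)) = ((i * N : Nat) : Int) := by push_cast; ring
      have h2 : (((i : Int) + 1) * (N : Int)) = ((i * N + N : Nat) : Int) := by push_cast; ring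
      rw [h1, h2, PySem.List.slice_natCast]
      congr 1
      omega
    simp [pvEnum, hslice]

-- ===== VERDICT (by name: the statement is the Claim_ definition above) =====
theorem build_ruta_diaria_spec : Claim_equal_build_ruta_diaria := by
  intro eps tracks n _
  unfold Spec_build_ruta_diaria build_ruta_diaria build_ruta_diaria_alt
  have hmax : max n 0 = ((n.toNat : Nat) : Int) := by omega
  have h0 : (0 : Int) = ((min (0 * n.toNat) tracks.length : Nat) : Int) := by simp
  rw [hmax, h0, pvOuter_eq tracks n.toNat eps 0 []]
  simp
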